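-- pv_equiv track=rewrite | github.com/sangpyeong/codingtest | 프로그래머스/파이썬/숫자 게임.py | solution
-- ===== SOURCE A (Python) =====
-- def solution(A, B):
--     answer = 0
--
--     N = len(A)
--
--     A.sort()
--     B.sort()
--     Aidx = 0
--     Bidx = 0
--     while Aidx < N and Bidx < N:
--         if A[Aidx] > B[Bidx]:
--             Bidx += 1
--         elif A[Aidx] < B[Bidx]:
--             Aidx += 1
--             Bidx += 1
--             answer += 1
--         else:
--             Bidx += 1
--
--     return answer
-- ===== SOURCE B (Python) =====
-- def solution(A, B):
--     # Binary search on the answer: k wins are achievable iff the k largest of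
--     # B's n smallest cards beat the k smallest A-cards pairwise (after sorting).
--     # That feasibility predicate is monotone in k, so binary search finds the max.
--     A.sort()
--     B.sort()
--     n = len(A)
--     tail = B[:n]
--
--     def wins(k):
--         return all(tail[n - k + i] > A[i] for i in range(k))
--
--     lo, hi = 0, n
--     while lo < hi:
--         mid = (lo + hi + 1) // 2
--         if wins(mid):
--             lo = mid
--         else:
--             hi = mid - 1
--     return lo
-- ===== Notes on version B (the rewrite author's own statement) =====
-- stated objective: alternative
-- what changed: Replaces the sequential two-pointer greedy scan by a binary search on the answer k, using the monotone feasibility check 'the k largest of B's n smallest cards beat the k smallest A-cards pairwise'.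
import Mathlib
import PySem

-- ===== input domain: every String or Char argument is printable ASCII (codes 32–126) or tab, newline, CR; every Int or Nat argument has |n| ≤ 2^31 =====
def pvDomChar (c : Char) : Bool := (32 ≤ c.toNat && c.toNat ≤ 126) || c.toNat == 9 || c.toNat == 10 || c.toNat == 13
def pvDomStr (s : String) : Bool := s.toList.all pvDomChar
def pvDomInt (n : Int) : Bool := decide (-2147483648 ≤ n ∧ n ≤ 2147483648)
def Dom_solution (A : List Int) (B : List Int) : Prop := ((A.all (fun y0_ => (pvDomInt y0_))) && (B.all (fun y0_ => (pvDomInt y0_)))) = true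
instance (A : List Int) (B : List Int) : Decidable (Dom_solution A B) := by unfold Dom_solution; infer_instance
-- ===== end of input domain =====

-- B replaces A's sequential greedy scan by a binary search on the answer with a
-- pairwise feasibility check; both Pythons sort their arguments in place identically,
-- so the equivalence proved here about the RETURN value is the whole observable difference (none).

-- ===== PORT A =====
-- the while loop: Aidx/Bidx indices into the sorted lists; Bidx increases every
-- iteration, Aidx only on a match.  Indexing is total here because under
-- Pre_solution every access is in range (A raises IndexError otherwise).
def solLoopA (a b : List Int) (N : Nat) (Aidx Bidx : Nat) (answer : Int) : Int :=
  if _h : Aidx < N ∧ Bidx < N then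
    if a.getD Aidx 0 > b.getD Bidx 0 then
      solLoopA a b N Aidx (Bidx + 1) answer
    else if a.getD Aidx 0 < b.getD Bidx 0 then
      solLoopA a b N (Aidx + 1) (Bidx + 1) (answer + 1)
    else
      solLoopA a b N Aidx (Bidx + 1) answer
  else answer
termination_by N - Bidx

def solution (A : List Int) (B : List Int) : Int :=
  let a := PySem.List.sorted A (fun x => x) false
  let b := PySem.List.sorted B (fun x => x) false
  solLoopA a b A.length 0 0 0

-- ===== PORT B =====
-- wins(k) of Source B: all(tail[n - k + i] > A[i] for i in range(k)).  Under
-- Pre_solution every index is nonnegative and in range, so getD is exact.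
def winsB (a tail : List Int) (n k : Nat) : Bool :=
  (List.range k).all (fun i => decide (tail.getD (n - k + i) 0 > a.getD i 0))

-- the while-loop of Source B's binary search (lo, hi stay in 0..n, so Nat is exact;
-- Python's // on nonnegative operands is Nat division)
def bsB (a tail : List Int) (n lo hi : Nat) : Nat :=
  if _h : lo < hi then
    let mid := (lo + hi + 1) / 2
    if winsB a tail n mid then bsB a tail n mid hi
    else bsB a tail n lo (mid - 1)
  else lo
termination_by hi - lo
decreasing_by all_goals omega

def solution_alt (A : List Int) (B : List Int) : Int :=
  let a := PySem.List.sorted A (fun x => x) false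
  let b := PySem.List.sorted B (fun x => x) false
  let n := A.length
  let tail := b.take n   -- B[:n] on a list of length ≥ n (Pre_): exact
  ((bsB a tail n 0 n : Nat) : Int)

-- ===== PRECONDITION & SPEC =====
-- A raises IndexError whenever len(A) > len(B) > 0-case (its loop always reaches B[len(B)]);
-- Pre_ excludes exactly the raising inputs.
def Pre_solution (A : List Int) (B : List Int) : Prop := A.length ≤ B.length
instance (A : List Int) (B : List Int) : Decidable (Pre_solution A B) := by
  unfold Pre_solution; infer_instance
def pvWitness_solution : List Int × List Int := ([3, 1, 2], [2, 3, 1])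

def Spec_solution (A : List Int) (B : List Int) (out : Int) : Prop := out = solution_alt A B
instance (A : List Int) (B : List Int) (out : Int) : Decidable (Spec_solution A B out) := by
  unfold Spec_solution; infer_instance

-- ===== CLAIM (what is proved, stated in full; the proofs are below) =====
def Claim_equal_solution : Prop := ∀ (A : List Int) (B : List Int), Dom_solution A B → Pre_solution A B → Spec_solution A B (solution A B)

-- ===== LEMMAS AND PROOFS =====

-- A's greedy as a list function (consumes b, pops a on a match), counting in Nat
def fwd : List Int → List Int → Nat
  | _, [] => 0
  | [], _ :: _ => 0
  | x :: a', y :: b' => if x < y then fwd a' b' + 1 else fwd (x :: a') b'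

-- the feasibility predicate wins(k), phrased against b's own length
def chk (a b : List Int) (k : Nat) : Bool :=
  (List.range k).all (fun i => decide (a.getD i 0 < b.getD (b.length - k + i) 0))

theorem chk_iff (a b : List Int) (k : Nat) :
    chk a b k = true ↔ ∀ i < k, a.getD i 0 < b.getD (b.length - k + i) 0 := by
  simp [chk, List.mem_range]

theorem winsB_eq_chk (a tail : List Int) (n k : Nat) (h : tail.length = n) :
    winsB a tail n k = chk a tail k := by
  simp [winsB, chk, h]

theorem fwd_le : ∀ b a : List Int, fwd a b ≤ min a.length b.length
  | [], a => by cases a <;> simp [fwd]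
  | y :: b', [] => by simp [fwd]
  | y :: b', x :: a' => by
      by_cases hxy : x < y
      · have := fwd_le b' a'
        simp only [fwd, if_pos hxy, List.length_cons]
        omega
      · have := fwd_le b' (x :: a')
        simp only [fwd, if_neg hxy, List.length_cons] at *
        omega

-- sorted access is monotone
theorem getD_mono (b : List Int) (hb : b.Pairwise (· ≤ ·)) (u v : Nat)
    (huv : u < v) (hv : v < b.length) : b.getD u 0 ≤ b.getD v 0 := by
  rw [List.getD_eq_getElem b 0 (by omega), List.getD_eq_getElem b 0 hv]
  exact List.pairwise_iff_getElem.mp hb u v (by omega) hv huv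

-- soundness: the greedy count is feasible
theorem chk_fwd : ∀ b a : List Int, b.Pairwise (· ≤ ·) → chk a b (fwd a b) = true
  | [], a, _ => by cases a <;> simp [fwd, chk]
  | y :: b', [], _ => by simp [fwd, chk]
  | y :: b', x :: a', hb => by
      have hymin : ∀ z ∈ b', y ≤ z := (List.pairwise_cons.mp hb).1
      by_cases hxy : x < y
      · have hg := (chk_iff a' b' (fwd a' b')).mp (chk_fwd b' a' hb.of_cons)
        have hle := fwd_le b' a'
        simp only [fwd, if_pos hxy]
        rw [chk_iff]
        intro i hi
        set g := fwd a' b' with hgdef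
        have hL : (y :: b').length - (g + 1) + i = b'.length - g + i := by
          simp only [List.length_cons]; omega
        rw [hL]
        cases i with
        | zero =>
            simp only [List.getD_cons_zero, Nat.add_zero]
            rcases Nat.eq_zero_or_pos (b'.length - g) with h0 | hpos
            · simpa [h0] using hxy
            · have hidx : b'.length - g - 1 < b'.length := by omega
              have : (y :: b').getD (b'.length - g) 0 = b'.getD (b'.length - g - 1) 0 := by
                rcases Nat.exists_eq_add_of_le hpos with ⟨m, hm⟩
                simp [show b'.length - g = m + 1 by omega]
              rw [this, List.getD_eq_getElem b' 0 hidx]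
              exact lt_of_lt_of_le hxy (hymin _ (List.getElem_mem _))
        | succ j =>
            have hj : j < g := by omega
            have := hg j hj
            have h1 : (x :: a').getD (j + 1) 0 = a'.getD j 0 := by simp
            have h2 : (y :: b').getD (b'.length - g + (j + 1)) 0
                = b'.getD (b'.length - g + j) 0 := by
              rw [show b'.length - g + (j + 1) = (b'.length - g + j) + 1 by omega]
              simp
            rw [show b'.length - g + (j+1) = b'.length - g + (j+1) from rfl, h1, h2]
            exact this
      · have hg := (chk_iff (x :: a') b' (fwd (x :: a') b')).mp
          (chk_fwd b' (x :: a') hb.of_cons)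
        have hle := fwd_le b' (x :: a')
        simp only [fwd, if_neg hxy]
        rw [chk_iff]
        intro i hi
        set g := fwd (x :: a') b' with hgdef
        have hgL : g ≤ b'.length := by
          have := hle; omega
        have h2 : (y :: b').getD ((y :: b').length - g + i) 0
            = b'.getD (b'.length - g + i) 0 := by
          rw [show (y :: b').length - g + i = (b'.length - g + i) + 1 by
            simp [List.length_cons]; omega]
          simp
        rw [h2]
        exact hg i hi

-- maximality: one more than the greedy count is infeasible (when it fits the lengths)
theorem chk_fwd_succ : ∀ b a : List Int,
    fwd a b + 1 ≤ min a.length b.length → chk a b (fwd a b + 1) = false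
  | [], a, h => by simp at h
  | y :: b', [], h => by simp at h
  | y :: b', x :: a', h => by
      by_cases hxy : x < y
      · simp only [fwd, if_pos hxy] at h ⊢
        set g := fwd a' b' with hgdef
        have hmin : g + 1 ≤ min a'.length b'.length := by
          simp [List.length_cons] at h; omega
        have ih := chk_fwd_succ b' a' hmin
        by_contra hcontra
        have hbig := (chk_iff (x :: a') (y :: b') (g + 1 + 1)).mp
          (by revert hcontra; cases hh : chk (x :: a') (y :: b') (g + 1 + 1) <;> simp_all)
        have : chk a' b' (g + 1) = true := by
          rw [chk_iff]
          intro i hi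
          have := hbig (i + 1) (by omega)
          have hL : (y :: b').length - (g + 1 + 1) + (i + 1)
              = (b'.length - (g + 1) + i) + 1 := by
            simp [List.length_cons]; omega
          rw [hL] at this
          simpa using this
        rw [ih] at this; exact absurd this (by simp)
      · simp only [fwd, if_neg hxy] at h ⊢
        set g := fwd (x :: a') b' with hgdef
        have hgL : g ≤ b'.length := by simp [List.length_cons] at h; omega
        by_contra hcontra
        have hbig := (chk_iff (x :: a') (y :: b') (g + 1)).mp
          (by revert hcontra; cases hh : chk (x :: a') (y :: b') (g + 1) <;> simp_all)
        rcases Nat.lt_or_ge g b'.length with hlt | hge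
        · -- g < len b': reindex into b' and use the IH
          have hmin : g + 1 ≤ min (x :: a').length b'.length := by
            simp [List.length_cons] at h ⊢; omega
          have ih := chk_fwd_succ b' (x :: a') hmin
          have : chk (x :: a') b' (g + 1) = true := by
            rw [chk_iff]
            intro i hi
            have := hbig i hi
            have hL : (y :: b').length - (g + 1) + i = (b'.length - (g + 1) + i) + 1 := by
              simp [List.length_cons]; omega
            rw [hL] at this
            simpa using this
          rw [ih] at this; exact absurd this (by simp)
        · -- g = len b': the check reaches b's head y, contradicting x ≥ y
          have hgeq : g = b'.length := by omega
          have := hbig 0 (by omega)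
          have hL : (y :: b').length - (g + 1) + 0 = 0 := by
            simp [List.length_cons]; omega
          rw [hL] at this
          simp only [List.getD_cons_zero] at this
          exact hxy (by simpa using this)

-- feasibility is downward monotone on a sorted list
theorem chk_pred (a b : List Int) (hb : b.Pairwise (· ≤ ·)) (k : Nat)
    (hk : k + 1 ≤ b.length) (h : chk a b (k + 1) = true) : chk a b k = true := by
  rw [chk_iff] at h ⊢
  intro i hi
  have h1 := h i (by omega)
  have hmono : b.getD (b.length - (k + 1) + i) 0 ≤ b.getD (b.length - k + i) 0 :=
    getD_mono b hb _ _ (by omega) (by omega)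
  omega

theorem chk_le_of_le (a b : List Int) (hb : b.Pairwise (· ≤ ·)) :
    ∀ j, j ≤ b.length → ∀ i, i ≤ j → chk a b j = true → chk a b i = true := by
  intro j
  induction j with
  | zero =>
      intro _ i hi h
      have : i = 0 := by omega
      rw [this]; simp [chk]
  | succ m ih =>
      intro hjL i hi h
      rcases Nat.lt_or_ge i (m + 1) with hlt | hge
      · exact ih (by omega) i (by omega) (chk_pred a b hb m (by omega) h)
      · have : i = m + 1 := by omega
        rw [this]; exact h

-- binary-search correctness: the result is feasible, bounded, and everything above it is infeasible
theorem bsB_correct (a tail : List Int) (n : Nat) (htl : tail.length = n)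
    (hbp : tail.Pairwise (· ≤ ·)) :
    ∀ lo hi, lo ≤ hi → hi ≤ n → chk a tail lo = true →
    (∀ k, hi < k → k ≤ n → chk a tail k = false) →
    chk a tail (bsB a tail n lo hi) = true ∧ bsB a tail n lo hi ≤ hi ∧
      (∀ k, bsB a tail n lo hi < k → k ≤ n → chk a tail k = false) := by
  intro lo hi
  fun_induction bsB a tail n lo hi with
  | case1 lo hi hlt mid hwin ih =>
      intro _ hhn hlo hhigh
      have hmid : lo < mid ∧ mid ≤ hi := by
        show lo < (lo + hi + 1) / 2 ∧ (lo + hi + 1) / 2 ≤ hi; omega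
      have := ih hmid.2 hhn (by rwa [winsB_eq_chk a tail n mid htl] at hwin) hhigh
      exact this
  | case2 lo hi hlt mid hwin ih =>
      intro _ hhn hlo hhigh
      have hmid : lo < mid ∧ mid ≤ hi := by
        show lo < (lo + hi + 1) / 2 ∧ (lo + hi + 1) / 2 ≤ hi; omega
      have hw : chk a tail mid = false := by
        rw [winsB_eq_chk a tail n mid htl] at hwin; simpa using hwin
      have hhigh' : ∀ k, mid - 1 < k → k ≤ n → chk a tail k = false := by
        intro k hk1 hk2
        rcases Nat.lt_or_ge hi k with hik | hik
        · exact hhigh k hik hk2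
        · -- mid ≤ k ≤ hi ≤ n: chk k would give chk mid by downward monotonicity
          by_contra hcc
          have hck : chk a tail k = true := by
            revert hcc; cases hh : chk a tail k <;> simp_all
          have hmidk : chk a tail mid = true :=
            chk_le_of_le a tail hbp k (by omega) mid (by omega) hck
          rw [hw] at hmidk; exact absurd hmidk (by simp)
      have := ih (by omega) (by omega) hlo hhigh'
      exact ⟨this.1, by omega, this.2.2⟩
  | case3 lo hi hlt =>
      intro hlohi hhn hlo hhigh
      exact ⟨hlo, by omega, fun k hk1 hk2 => hhigh k (by omega) hk2⟩

-- bridge: port A's index loop computes the forward greedy on suffixes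
theorem solLoopA_eq (a b : List Int) (N Aidx Bidx : Nat) (answer : Int)
    (hN : N = a.length) (hNb : N ≤ b.length) :
    solLoopA a b N Aidx Bidx answer
      = answer + (fwd (a.drop Aidx) ((b.take N).drop Bidx) : Int) := by
  fun_induction solLoopA a b N Aidx Bidx answer with
  | case1 Aidx Bidx answer h hgt ih =>
      obtain ⟨hA, hB⟩ := h
      rw [ih]
      have hBb : Bidx < b.length := lt_of_lt_of_le hB hNb
      rw [List.drop_eq_getElem_cons (by omega : Aidx < a.length),
        List.drop_eq_getElem_cons (by simp; omega : Bidx < (b.take N).length),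
        List.getElem_take]
      simp only [fwd]
      rw [if_neg (by
        rw [List.getD_eq_getElem a 0 (by omega), List.getD_eq_getElem b 0 hBb] at hgt
        omega)]
  | case2 Aidx Bidx answer h hgt hlt ih =>
      rw [ih]
      obtain ⟨hA, hB⟩ := h
      have hBb : Bidx < b.length := lt_of_lt_of_le hB hNb
      rw [List.drop_eq_getElem_cons (by omega : Aidx < a.length),
        List.drop_eq_getElem_cons (by simp; omega : Bidx < (b.take N).length),
        List.getElem_take]
      simp only [fwd]
      rw [if_pos (by
        rw [List.getD_eq_getElem a 0 (by omega), List.getD_eq_getElem b 0 hBb] at hlt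
        omega)]
      push_cast; ring
  | case3 Aidx Bidx answer h hgt hlt ih =>
      obtain ⟨hA, hB⟩ := h
      rw [ih]
      have hBb : Bidx < b.length := lt_of_lt_of_le hB hNb
      rw [List.drop_eq_getElem_cons (by omega : Aidx < a.length),
        List.drop_eq_getElem_cons (by simp; omega : Bidx < (b.take N).length),
        List.getElem_take]
      simp only [fwd]
      rw [if_neg (by
        rw [List.getD_eq_getElem a 0 (by omega), List.getD_eq_getElem b 0 hBb] at hgt
        rw [List.getD_eq_getElem a 0 (by omega), List.getD_eq_getElem b 0 hBb] at hlt
        omega)]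
  | case4 Aidx Bidx answer h =>
      rcases Nat.lt_or_ge Aidx N with hA | hA
      · have hB : ¬ Bidx < N := fun hB => h ⟨hA, hB⟩
        rw [List.drop_eq_nil_of_le (by simp; omega : (b.take N).length ≤ Bidx)]
        cases a.drop Aidx <;> simp [fwd]
      · rw [List.drop_eq_nil_of_le (by omega : a.length ≤ Aidx)]
        cases (b.take N).drop Bidx <;> simp [fwd]

-- ===== VERDICT (by name: the statement is the Claim_ definition above) =====
theorem solution_spec : Claim_equal_solution := by
  intro A B _hdom hpre
  unfold Spec_solution solution solution_alt
  simp only []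
  set a := PySem.List.sorted A (fun x => x) false with ha
  set b := PySem.List.sorted B (fun x => x) false with hb
  have hla : a.length = A.length := PySem.List.length_sorted ..
  have hlb : b.length = B.length := PySem.List.length_sorted ..
  have hNb : A.length ≤ b.length := by rw [hlb]; exact hpre
  have hpb : b.Pairwise (· ≤ ·) := PySem.List.sorted_pairwise ..
  set n := A.length with hn
  set tail := b.take n with htail
  have htl : tail.length = n := by rw [htail, List.length_take]; omega
  have htp : tail.Pairwise (· ≤ ·) := hpb.sublist (List.take_sublist _ _)
  -- A's side: the loop computes the greedy count
  have hA : solLoopA a b n 0 0 0 = (fwd a tail : Int) := by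
    rw [solLoopA_eq a b n 0 0 0 hla.symm hNb]
    simp [htail]
  set g := fwd a tail with hg
  have hgle : g ≤ n := by
    have := fwd_le tail a; omega
  have hfeas : chk a tail g = true := chk_fwd tail a htp
  have hhigh : ∀ k, g < k → k ≤ n → chk a tail k = false := by
    intro k hk1 hk2
    have hsucc : chk a tail (g + 1) = false := by
      apply chk_fwd_succ tail a
      omega
    by_contra hcc
    have hck : chk a tail k = true := by
      revert hcc; cases hh : chk a tail k <;> simp_all
    have := chk_le_of_le a tail htp k (by omega) (g + 1) (by omega) hck
    rw [hsucc] at this; exact absurd this (by simp)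
  -- B's side: the binary search finds exactly g
  have hB := bsB_correct a tail n htl htp 0 n (by omega) (le_refl n)
    (by simp [chk]) (by intro k h1 h2; omega)
  set r := bsB a tail n 0 n with hr
  have hrg : r = g := by
    rcases Nat.lt_trichotomy r g with h | h | h
    · have := hB.2.2 g h hgle
      rw [hfeas] at this; exact absurd this (by simp)
    · exact h
    · have := hhigh r h hB.2.1
      rw [hB.1] at this; exact absurd this (by simp)
  rw [hA, hrg]
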